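-- pv_equiv track=rewrite | github.com/NEU-1/python-study | 트리.py | cnt_node
-- ===== SOURCE A (Python) =====
-- def cnt_node(node, tree, del_node):
--     # 현재 노드가 삭제할 노드인 경우 0을 반환
--     if node == del_node:
--         return 0
--
--     count = 0
--     # 자식 노드들을 재귀적으로 탐색하면서, 남은 노드들의 개수를 세어 누적
--     for child in tree[node]:
--         count += cnt_node(child, tree, del_node)
--
--     # 자식 노드들의 개수가 0이면 리프 노드이므로 1을 반환
--     if count == 0:
--         return 1
--
--     return count
-- ===== SOURCE B (Python) =====
-- def cnt_node(node, tree, del_node):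
--     # Iterative DFS with an explicit stack: count the leaves of the pruned tree
--     # directly (a node all of whose children are del_node is a leaf of the
--     # pruned tree), instead of summing child counts recursively.
--     if node == del_node:
--         return 0
--     stack = [node]
--     leaves = 0
--     while stack:
--         n = stack.pop()
--         kids = [c for c in tree[n] if c != del_node]
--         if not kids:
--             leaves += 1
--         else:
--             stack.extend(kids)
--     return leaves
-- ===== Notes on version B (the rewrite author's own statement) =====
-- stated objective: alternative
-- what changed: Replaces A's recursive child-count summation by an iterative explicit-stack DFS that counts the leaves of the pruned tree directly (a node whose children are all del_node contributes 1), so no per-node sums or recursion are used.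
import Mathlib
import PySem

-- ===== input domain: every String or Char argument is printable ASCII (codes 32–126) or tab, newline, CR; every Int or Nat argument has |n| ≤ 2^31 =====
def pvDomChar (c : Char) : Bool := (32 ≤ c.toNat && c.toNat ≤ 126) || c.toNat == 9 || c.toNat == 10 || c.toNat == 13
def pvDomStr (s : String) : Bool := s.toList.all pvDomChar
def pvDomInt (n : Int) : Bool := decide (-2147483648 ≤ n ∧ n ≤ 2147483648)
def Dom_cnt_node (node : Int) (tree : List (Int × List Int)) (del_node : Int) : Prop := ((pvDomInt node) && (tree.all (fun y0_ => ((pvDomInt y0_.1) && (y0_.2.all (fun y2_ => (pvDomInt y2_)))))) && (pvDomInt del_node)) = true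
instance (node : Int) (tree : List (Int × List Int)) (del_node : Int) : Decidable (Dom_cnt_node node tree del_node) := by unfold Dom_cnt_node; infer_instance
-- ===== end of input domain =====

-- B replaces A's recursive sum of child counts by an iterative explicit-stack DFS that
-- counts pruned-tree leaves directly (objective: alternative; not claimed faster).

-- ===== PORT A =====
-- dict lookup tree[node]: first matching key of the association list (exact; none = KeyError)
def pvLookup (tree : List (Int × List Int)) (k : Int) : Option (List Int) :=
  (tree.find? (fun p => p.1 == k)).map (fun p => p.2)

-- literal port of A's recursion; fuel only makes it total (Pre_ guarantees it never runs out)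
def cntA (tree : List (Int × List Int)) (del_node : Int) : Nat → Int → Int
  | 0, _ => 0
  | fuel+1, node =>
    if node = del_node then 0
    else
      match pvLookup tree node with
      | none => 0   -- KeyError in Python; excluded by Pre_
      | some cs =>
        let count := cs.foldl (fun acc c => acc + cntA tree del_node fuel c) 0
        if count = 0 then 1 else count

def cnt_node (node : Int) (tree : List (Int × List Int)) (del_node : Int) : Int :=
  cntA tree del_node (tree.length + 1) node

-- ===== PORT B =====
-- fuel bound for the while-loop (under Pre_ the loop performs at most this many iterations)
def pvBFuel (tree : List (Int × List Int)) : Nat :=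
  ((tree.flatMap Prod.snd).length + 2) ^ (tree.length + 1)

-- literal port of B's while-loop: pop n, filter del_node out of its children,
-- a node with no remaining children is a pruned-tree leaf, otherwise push the kids
def loopB (tree : List (Int × List Int)) (del_node : Int) : Nat → List Int → Int → Int
  | 0, _, acc => acc
  | _+1, [], acc => acc
  | fuel+1, n :: rest, acc =>
    match pvLookup tree n with
    | none => acc   -- KeyError in Python; excluded by Pre_
    | some cs =>
      let kids := cs.filter (fun c => c != del_node)
      if kids = [] then loopB tree del_node fuel rest (acc + 1)
      else loopB tree del_node fuel (kids.reverse ++ rest) acc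

def cnt_node_alt (node : Int) (tree : List (Int × List Int)) (del_node : Int) : Int :=
  if node = del_node then 0 else loopB tree del_node (pvBFuel tree) [node] 0

-- ===== PRECONDITION & SPEC =====
-- the non-deleted children of a node (the edges A actually recurses through)
def succs (tree : List (Int × List Int)) (del_node n : Int) : List Int :=
  if n = del_node then [] else ((pvLookup tree n).getD []).filter (fun c => c != del_node)

def closeStep (tree : List (Int × List Int)) (del_node : Int) (S : Finset Int) : Finset Int :=
  S ∪ S.biUnion (fun m => (succs tree del_node m).toFinset)

def reachN (tree : List (Int × List Int)) (del_node n : Int) : Nat → Finset Int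
  | 0 => {n}
  | k+1 => closeStep tree del_node (reachN tree del_node n k)

-- all nodes A's recursion visits from n (closure is reached within |children|+1 rounds)
def ReachSet (tree : List (Int × List Int)) (del_node n : Int) : Finset Int :=
  reachN tree del_node n ((tree.flatMap Prod.snd).length + 1)

-- Pre_ excludes exactly the inputs on which A raises: a KeyError (some node A's recursion
-- reaches is not a key of the dict) or unbounded recursion (a cycle among reached nodes);
-- when node = del_node A returns 0 without any lookup, so every tree is admitted there.
def Pre_cnt_node (node : Int) (tree : List (Int × List Int)) (del_node : Int) : Prop :=
  node = del_node ∨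
  (node ≠ del_node ∧
   ∀ m ∈ ReachSet tree del_node node,
     m ∈ tree.map Prod.fst ∧ ∀ c ∈ succs tree del_node m, m ∉ ReachSet tree del_node c)

instance (node : Int) (tree : List (Int × List Int)) (del_node : Int) : Decidable (Pre_cnt_node node tree del_node) := by unfold Pre_cnt_node; infer_instance

def pvWitness_cnt_node : Int × (List (Int × List Int)) × Int :=
  (1, [(1, [2, 3]), (2, []), (3, [4]), (4, [])], 4)

def Spec_cnt_node (node : Int) (tree : List (Int × List Int)) (del_node : Int) (out : Int) : Prop := out = cnt_node_alt node tree del_node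
instance (node : Int) (tree : List (Int × List Int)) (del_node : Int) (out : Int) : Decidable (Spec_cnt_node node tree del_node out) := by unfold Spec_cnt_node; infer_instance

-- ===== CLAIM (what is proved, stated in full; the proofs are below) =====
def Claim_equal_cnt_node : Prop := ∀ (node : Int) (tree : List (Int × List Int)) (del_node : Int), Dom_cnt_node node tree del_node → Pre_cnt_node node tree del_node → Spec_cnt_node node tree del_node (cnt_node node tree del_node)

-- ===== LEMMAS AND PROOFS =====

theorem lookup_exists (tree : List (Int × List Int)) (n : Int)
    (h : n ∈ tree.map Prod.fst) :
    ∃ cs, pvLookup tree n = some cs ∧ (n, cs) ∈ tree := by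
  obtain ⟨p, hp, hfst⟩ := List.mem_map.mp h
  have hsome : (tree.find? (fun p => p.1 == n)).isSome := by
    apply List.find?_isSome.mpr
    exact ⟨p, hp, by simp [hfst]⟩
  obtain ⟨q, hq⟩ := Option.isSome_iff_exists.mp hsome
  have hqmem : q ∈ tree := List.mem_of_find?_eq_some hq
  have hqn : q.1 = n := by
    have := List.find?_some hq
    simpa using this
  exact ⟨q.2, by simp [pvLookup, hq], by
    have : q = (n, q.2) := by
      cases q; simp_all
    rw [← this]; exact hqmem⟩

theorem sublist_of_mem_map_snd (tree : List (Int × List Int)) (n : Int) (cs : List Int)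
    (h : (n, cs) ∈ tree) : cs.Sublist (tree.flatMap Prod.snd) := by
  induction tree with
  | nil => simp at h
  | cons p ps ih =>
    rcases List.mem_cons.mp h with h | h
    · simp [List.flatMap_cons, ← h]
    · simp only [List.flatMap_cons]
      exact (ih h).trans (List.sublist_append_right _ _)

theorem succs_subset (tree : List (Int × List Int)) (del_node m : Int) :
    ∀ c ∈ succs tree del_node m, c ∈ tree.flatMap Prod.snd := by
  intro c hc
  unfold succs at hc
  split_ifs at hc with h
  · simp at hc
  · cases hl : pvLookup tree m with
    | none => rw [hl] at hc; simp at hc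
    | some cs =>
      rw [hl] at hc
      simp only [Option.getD_some] at hc
      have hcs : c ∈ cs := (List.mem_filter.mp hc).1
      obtain ⟨p, hp, hq⟩ : ∃ p ∈ tree, p.2 = cs := by
        unfold pvLookup at hl
        cases hf : tree.find? (fun p => p.1 == m) with
        | none => rw [hf] at hl; simp at hl
        | some q =>
          rw [hf] at hl
          simp at hl
          exact ⟨q, List.mem_of_find?_eq_some hf, hl⟩
      have := sublist_of_mem_map_snd tree p.1 p.2 (by rw [Prod.mk.eta]; exact hp)
      rw [hq] at this
      exact this.mem hcs

theorem reachN_subset_U (tree : List (Int × List Int)) (del_node n : Int) :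
    ∀ k, reachN tree del_node n k ⊆ insert n (tree.flatMap Prod.snd).toFinset := by
  intro k
  induction k with
  | zero => simp [reachN]
  | succ k ih =>
    simp only [reachN, closeStep]
    apply Finset.union_subset ih
    intro x hx
    obtain ⟨m, _, hm⟩ := Finset.mem_biUnion.mp hx
    have := succs_subset tree del_node m x (List.mem_toFinset.mp hm)
    simp [this]

theorem reachN_mono (tree : List (Int × List Int)) (del_node n : Int) (k : Nat) :
    reachN tree del_node n k ⊆ reachN tree del_node n (k+1) := by
  simp only [reachN, closeStep]
  exact Finset.subset_union_left

theorem reachN_le_mono (tree : List (Int × List Int)) (del_node n : Int) {j k : Nat}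
    (h : j ≤ k) : reachN tree del_node n j ⊆ reachN tree del_node n k := by
  induction h with
  | refl => exact Finset.Subset.refl _
  | step _ ih => exact ih.trans (reachN_mono tree del_node n _)

theorem fix_forever (tree : List (Int × List Int)) (del_node n : Int) (j : Nat)
    (h : reachN tree del_node n j = reachN tree del_node n (j+1)) :
    ∀ i, reachN tree del_node n (j+i) = reachN tree del_node n j := by
  intro i
  induction i with
  | zero => rfl
  | succ i ih =>
    have : reachN tree del_node n (j+i+1) = closeStep tree del_node (reachN tree del_node n (j+i)) := rfl
    rw [show j + (i+1) = j + i + 1 from rfl, this, ih]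
    exact h.symm

theorem grow_card (tree : List (Int × List Int)) (del_node n : Int) :
    ∀ k, (∀ j < k, reachN tree del_node n j ≠ reachN tree del_node n (j+1)) →
      k + 1 ≤ (reachN tree del_node n k).card := by
  intro k
  induction k with
  | zero => intro _; simp [reachN]
  | succ k ih =>
    intro h
    have h1 := ih (fun j hj => h j (Nat.lt_succ_of_lt hj))
    have hne := h k (Nat.lt_succ_self k)
    have hss : reachN tree del_node n k ⊂ reachN tree del_node n (k+1) :=
      lt_of_le_of_ne (reachN_mono tree del_node n k) hne
    have := Finset.card_lt_card hss
    omega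

theorem ReachSet_fix (tree : List (Int × List Int)) (del_node n : Int) :
    ReachSet tree del_node n =
      closeStep tree del_node (ReachSet tree del_node n) := by
  set K := (tree.flatMap Prod.snd).length + 1 with hK
  by_cases hall : ∀ j < K, reachN tree del_node n j ≠ reachN tree del_node n (j+1)
  · exfalso
    have h1 := grow_card tree del_node n K hall
    have h2 : (reachN tree del_node n K).card ≤ K := by
      calc (reachN tree del_node n K).card
          ≤ (insert n (tree.flatMap Prod.snd).toFinset).card :=
            Finset.card_le_card (reachN_subset_U tree del_node n K)
        _ ≤ (tree.flatMap Prod.snd).toFinset.card + 1 := Finset.card_insert_le _ _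
        _ ≤ (tree.flatMap Prod.snd).length + 1 := by
            have := (tree.flatMap Prod.snd).toFinset_card_le
            omega
    omega
  · push Not at hall
    obtain ⟨j, hj, hfix⟩ := hall
    have h1 := fix_forever tree del_node n j hfix (K - j)
    have h2 := fix_forever tree del_node n j hfix (K + 1 - j)
    have e1 : j + (K - j) = K := by omega
    have e2 : j + (K + 1 - j) = K + 1 := by omega
    rw [e1] at h1; rw [e2] at h2
    show reachN tree del_node n K = reachN tree del_node n (K+1)
    rw [h1, h2]

theorem ReachSet_closed (tree : List (Int × List Int)) (del_node n : Int)
    {m : Int} (hm : m ∈ ReachSet tree del_node n) :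
    ∀ c ∈ succs tree del_node m, c ∈ ReachSet tree del_node n := by
  intro c hc
  rw [ReachSet_fix tree del_node n]
  unfold closeStep
  apply Finset.mem_union_right
  exact Finset.mem_biUnion.mpr ⟨m, hm, List.mem_toFinset.mpr hc⟩

theorem self_mem_ReachSet (tree : List (Int × List Int)) (del_node n : Int) :
    n ∈ ReachSet tree del_node n :=
  reachN_le_mono tree del_node n (Nat.zero_le _) (by simp [reachN])

theorem ReachSet_least (tree : List (Int × List Int)) (del_node c : Int) (S : Finset Int)
    (hc : c ∈ S) (hS : ∀ m ∈ S, ∀ x ∈ succs tree del_node m, x ∈ S) :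
    ReachSet tree del_node c ⊆ S := by
  have : ∀ k, reachN tree del_node c k ⊆ S := by
    intro k
    induction k with
    | zero => simpa [reachN]
    | succ k ih =>
      simp only [reachN, closeStep]
      apply Finset.union_subset ih
      intro x hx
      obtain ⟨m, hm, hxm⟩ := Finset.mem_biUnion.mp hx
      exact hS m (ih hm) x (List.mem_toFinset.mp hxm)
  exact this _

-- the recursion measure: number of nodes A's recursion visits from n
def pvRank (tree : List (Int × List Int)) (del_node n : Int) : Nat :=
  (ReachSet tree del_node n).card

theorem pvRank_pos (tree : List (Int × List Int)) (del_node n : Int) :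
    1 ≤ pvRank tree del_node n :=
  Finset.card_pos.mpr ⟨n, self_mem_ReachSet tree del_node n⟩

theorem ReachSet_child_subset (tree : List (Int × List Int)) (del_node m c : Int)
    (hc : c ∈ succs tree del_node m) :
    ReachSet tree del_node c ⊆ ReachSet tree del_node m :=
  ReachSet_least tree del_node c _
    (ReachSet_closed tree del_node m (self_mem_ReachSet tree del_node m) c hc)
    (fun y hy => ReachSet_closed tree del_node m hy)

theorem pvRank_child_lt (tree : List (Int × List Int)) (del_node m c : Int)
    (hc : c ∈ succs tree del_node m) (hac : m ∉ ReachSet tree del_node c) :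
    pvRank tree del_node c < pvRank tree del_node m := by
  apply Finset.card_lt_card
  rw [Finset.ssubset_iff_of_subset (ReachSet_child_subset tree del_node m c hc)]
  exact ⟨m, self_mem_ReachSet tree del_node m, hac⟩

theorem pvRank_le_keys (tree : List (Int × List Int)) (del_node node m : Int)
    (hR : ∀ x ∈ ReachSet tree del_node node, x ∈ tree.map Prod.fst)
    (hm : m ∈ ReachSet tree del_node node) :
    pvRank tree del_node m ≤ tree.length := by
  have hsub : ReachSet tree del_node m ⊆ ReachSet tree del_node node :=
    ReachSet_least tree del_node m _ hm (fun x hx => ReachSet_closed tree del_node node hx)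
  have hkeys : ReachSet tree del_node node ⊆ (tree.map Prod.fst).toFinset := by
    intro x hx
    exact List.mem_toFinset.mpr (hR x hx)
  calc pvRank tree del_node m
      ≤ (ReachSet tree del_node node).card := Finset.card_le_card hsub
    _ ≤ (tree.map Prod.fst).toFinset.card := Finset.card_le_card hkeys
    _ ≤ (tree.map Prod.fst).length := (tree.map Prod.fst).toFinset_card_le
    _ = tree.length := List.length_map ..

-- membership in succs from a successful lookup
theorem mem_succs_of (tree : List (Int × List Int)) (del_node n c : Int) (cs : List Int)
    (hdel : n ≠ del_node) (hl : pvLookup tree n = some cs)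
    (hc : c ∈ cs) (hcd : c ≠ del_node) : c ∈ succs tree del_node n := by
  unfold succs
  rw [if_neg hdel, hl]
  simp [List.mem_filter, hc, hcd]

theorem foldl_add_int (l : List Int) (g : Int → Int) (a : Int) :
    l.foldl (fun acc c => acc + g c) a = a + (l.map g).sum := by
  induction l generalizing a with
  | nil => simp
  | cons x xs ih => simp [List.foldl_cons, ih, List.map_cons]; ring

theorem cntA_del (tree : List (Int × List Int)) (del_node : Int) :
    ∀ f, cntA tree del_node f del_node = 0 := by
  intro f; cases f <;> simp [cntA]

theorem cntA_nonneg (tree : List (Int × List Int)) (del_node : Int) :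
    ∀ fuel n, 0 ≤ cntA tree del_node fuel n := by
  intro fuel
  induction fuel with
  | zero => intro n; simp [cntA]
  | succ f ih =>
    intro n
    simp only [cntA]
    split_ifs with h
    · exact le_refl 0
    · cases hl : pvLookup tree n with
      | none => simp
      | some cs =>
        simp only []
        have hsum : 0 ≤ (cs.map (cntA tree del_node f)).sum := by
          apply List.sum_nonneg
          intro x hx
          obtain ⟨c, _, rfl⟩ := List.mem_map.mp hx
          exact ih c
        rw [foldl_add_int]
        split_ifs with h0
        · omega
        · omega

-- the fuel is irrelevant once it reaches the measure
theorem cntA_stable (tree : List (Int × List Int)) (del_node node : Int)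
    (hR : ∀ m ∈ ReachSet tree del_node node,
      m ∈ tree.map Prod.fst ∧ ∀ c ∈ succs tree del_node m, m ∉ ReachSet tree del_node c) :
    ∀ N n f₁ f₂, pvRank tree del_node n ≤ N →
      pvRank tree del_node n ≤ f₁ → pvRank tree del_node n ≤ f₂ →
      (n = del_node ∨ n ∈ ReachSet tree del_node node) →
      cntA tree del_node (f₁+1) n = cntA tree del_node (f₂+1) n := by
  intro N
  induction N with
  | zero =>
    intro n f₁ f₂ hN _ _ hv
    rcases hv with h | h
    · simp [cntA, h]
    · exact absurd hN (by have := pvRank_pos tree del_node n; omega)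
  | succ N ih =>
    intro n f₁ f₂ hN h1 h2 hv
    rcases hv with h | h
    · simp [cntA, h]
    · by_cases hdel : n = del_node
      · simp [cntA, hdel]
      · obtain ⟨hkey, hac⟩ := hR n h
        obtain ⟨cs, hfind, hmem⟩ := lookup_exists tree n hkey
        have hr1 : 1 ≤ pvRank tree del_node n := pvRank_pos tree del_node n
        simp only [cntA, if_neg hdel, hfind]
        have hcong : ∀ c ∈ cs, cntA tree del_node f₁ c = cntA tree del_node f₂ c := by
          intro c hc
          by_cases hcd : c = del_node
          · rw [hcd, cntA_del, cntA_del]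
          · have hsc : c ∈ succs tree del_node n :=
              mem_succs_of tree del_node n c cs hdel hfind hc hcd
            have hcR : c ∈ ReachSet tree del_node node := ReachSet_closed tree del_node node h c hsc
            have hrc : pvRank tree del_node c < pvRank tree del_node n :=
              pvRank_child_lt tree del_node n c hsc (hac c hsc)
            obtain ⟨f₁', rfl⟩ : ∃ f, f₁ = f + 1 := ⟨f₁ - 1, by omega⟩
            obtain ⟨f₂', rfl⟩ : ∃ f, f₂ = f + 1 := ⟨f₂ - 1, by omega⟩
            exact ih c f₁' f₂' (by omega) (by omega) (by omega) (Or.inr hcR)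
        have : cs.foldl (fun acc c => acc + cntA tree del_node f₁ c) 0
             = cs.foldl (fun acc c => acc + cntA tree del_node f₂ c) 0 :=
          PySem.List.foldl_congr_mem cs _ _ 0 (fun acc x hx => by rw [hcong x hx])
        simp only [this]

-- one-step unfolding of cnt_node at a reached node, with canonical-fuel recursive calls
theorem cnt_node_expand (tree : List (Int × List Int)) (del_node node n : Int) (cs : List Int)
    (hR : ∀ m ∈ ReachSet tree del_node node,
      m ∈ tree.map Prod.fst ∧ ∀ c ∈ succs tree del_node m, m ∉ ReachSet tree del_node c)
    (hn : n ∈ ReachSet tree del_node node) (hdel : n ≠ del_node)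
    (hfind : pvLookup tree n = some cs) :
    cnt_node n tree del_node =
      (if (cs.map (fun c => cnt_node c tree del_node)).sum = 0 then 1
       else (cs.map (fun c => cnt_node c tree del_node)).sum) := by
  have hkeys : ∀ x ∈ ReachSet tree del_node node, x ∈ tree.map Prod.fst :=
    fun x hx => (hR x hx).1
  have hL : pvRank tree del_node n ≤ tree.length := pvRank_le_keys tree del_node node n hkeys hn
  have hr1 : 1 ≤ pvRank tree del_node n := pvRank_pos tree del_node n
  show cntA tree del_node (tree.length + 1) n = _
  simp only [cntA, if_neg hdel, hfind]
  have hcong : ∀ c ∈ cs, cntA tree del_node tree.length c = cnt_node c tree del_node := by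
    intro c hc
    by_cases hcd : c = del_node
    · rw [hcd, cntA_del]; exact (cntA_del tree del_node _).symm
    · have hsc : c ∈ succs tree del_node n :=
        mem_succs_of tree del_node n c cs hdel hfind hc hcd
      have hcR : c ∈ ReachSet tree del_node node := ReachSet_closed tree del_node node hn c hsc
      have hrc : pvRank tree del_node c < pvRank tree del_node n :=
        pvRank_child_lt tree del_node n c hsc ((hR n hn).2 c hsc)
      obtain ⟨L', hL'⟩ : ∃ L, tree.length = L + 1 := ⟨tree.length - 1, by omega⟩
      have hcc : cnt_node c tree del_node = cntA tree del_node (tree.length + 1) c := rfl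
      rw [hcc, hL']
      exact cntA_stable tree del_node node hR (pvRank tree del_node c) c L' (L' + 1)
        (le_refl _) (by omega) (by omega) (Or.inr hcR)
  have : cs.foldl (fun acc c => acc + cntA tree del_node tree.length c) 0
       = cs.foldl (fun acc c => acc + cnt_node c tree del_node) 0 :=
    PySem.List.foldl_congr_mem cs _ _ 0 (fun acc x hx => by rw [hcong x hx])
  rw [this, foldl_add_int]
  simp

theorem cnt_node_del (tree : List (Int × List Int)) (del_node : Int) :
    cnt_node del_node tree del_node = 0 := by
  simp [cnt_node, cntA]

theorem cnt_node_nonneg (tree : List (Int × List Int)) (del_node n : Int) :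
    0 ≤ cnt_node n tree del_node := cntA_nonneg tree del_node (tree.length + 1) n

theorem cnt_node_pos (tree : List (Int × List Int)) (del_node node n : Int)
    (hR : ∀ m ∈ ReachSet tree del_node node,
      m ∈ tree.map Prod.fst ∧ ∀ c ∈ succs tree del_node m, m ∉ ReachSet tree del_node c)
    (hn : n ∈ ReachSet tree del_node node) (hdel : n ≠ del_node) :
    1 ≤ cnt_node n tree del_node := by
  obtain ⟨cs, hfind, hmem⟩ := lookup_exists tree n (hR n hn).1
  rw [cnt_node_expand tree del_node node n cs hR hn hdel hfind]
  have : 0 ≤ (cs.map (fun c => cnt_node c tree del_node)).sum := by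
    apply List.sum_nonneg
    intro x hx
    obtain ⟨c, _, rfl⟩ := List.mem_map.mp hx
    exact cnt_node_nonneg tree del_node c
  split_ifs with h0 <;> omega

-- dropping the del_node children (which contribute 0) from the sum
theorem sum_filter_ne (del_node : Int) (g : Int → Int) (hg : g del_node = 0) :
    ∀ cs : List Int, (cs.map g).sum = ((cs.filter (fun c => c != del_node)).map g).sum := by
  intro cs
  induction cs with
  | nil => simp
  | cons x xs ih =>
    by_cases hx : x = del_node
    · simp [hx, hg, ih]
    · simp [hx, ih]

-- the stack measure: each step of the loop strictly decreases it
def muS (tree : List (Int × List Int)) (del_node : Int) (stack : List Int) : Nat :=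
  (stack.map (fun s => ((tree.flatMap Prod.snd).length + 2) ^ pvRank tree del_node s)).sum

theorem muS_kids_le (tree : List (Int × List Int)) (del_node node n : Int) (cs : List Int)
    (hR : ∀ m ∈ ReachSet tree del_node node,
      m ∈ tree.map Prod.fst ∧ ∀ c ∈ succs tree del_node m, m ∉ ReachSet tree del_node c)
    (hn : n ∈ ReachSet tree del_node node) (hdel : n ≠ del_node)
    (hfind : pvLookup tree n = some cs) (hmem : (n, cs) ∈ tree) :
    muS tree del_node (cs.filter (fun c => c != del_node)) + 1
      ≤ ((tree.flatMap Prod.snd).length + 2) ^ pvRank tree del_node n := by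
  set B := (tree.flatMap Prod.snd).length + 2 with hB
  set kids := cs.filter (fun c => c != del_node) with hkids
  have hr1 : 1 ≤ pvRank tree del_node n := pvRank_pos tree del_node n
  obtain ⟨m', hm'⟩ : ∃ m, pvRank tree del_node n = m + 1 := ⟨pvRank tree del_node n - 1, by omega⟩
  have hlen : kids.length ≤ (tree.flatMap Prod.snd).length := by
    calc kids.length ≤ cs.length := List.length_filter_le _ _
      _ ≤ (tree.flatMap Prod.snd).length :=
          (sublist_of_mem_map_snd tree n cs hmem).length_le
  have hbound : ∀ x ∈ kids.map (fun s => B ^ pvRank tree del_node s), x ≤ B ^ m' := by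
    intro x hx
    obtain ⟨c, hc, rfl⟩ := List.mem_map.mp hx
    have hcc : c ∈ cs ∧ c ≠ del_node := by
      have := List.mem_filter.mp hc
      exact ⟨this.1, by simpa using this.2⟩
    have hsc : c ∈ succs tree del_node n :=
      mem_succs_of tree del_node n c cs hdel hfind hcc.1 hcc.2
    have : pvRank tree del_node c < pvRank tree del_node n :=
      pvRank_child_lt tree del_node n c hsc ((hR n hn).2 c hsc)
    exact Nat.pow_le_pow_right (by omega) (by omega)
  have hsum : muS tree del_node kids ≤ kids.length * B ^ m' := by
    have h := List.sum_le_card_nsmul (kids.map (fun s => B ^ pvRank tree del_node s)) (B ^ m') hbound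
    rw [List.length_map, smul_eq_mul] at h
    unfold muS
    rw [← hB]
    exact h
  have hpow1 : 1 ≤ B ^ m' := Nat.one_le_pow _ _ (by omega)
  calc muS tree del_node kids + 1 ≤ kids.length * B ^ m' + 1 := by omega
    _ ≤ ((tree.flatMap Prod.snd).length + 1) * B ^ m' := by
        have := Nat.mul_le_mul_right (B ^ m') hlen
        nlinarith
    _ ≤ B * B ^ m' := by
        have : (tree.flatMap Prod.snd).length + 1 ≤ B := by omega
        exact Nat.mul_le_mul_right _ this
    _ = B ^ (m' + 1) := by ring
    _ = B ^ pvRank tree del_node n := by rw [hm']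

-- the loop invariant: with enough fuel the loop adds the pruned-leaf count of every stack entry
theorem loopB_inv (tree : List (Int × List Int)) (del_node node : Int)
    (hR : ∀ m ∈ ReachSet tree del_node node,
      m ∈ tree.map Prod.fst ∧ ∀ c ∈ succs tree del_node m, m ∉ ReachSet tree del_node c) :
    ∀ N stack acc fuel, muS tree del_node stack ≤ N → muS tree del_node stack ≤ fuel →
      (∀ s ∈ stack, s ≠ del_node ∧ s ∈ ReachSet tree del_node node) →
      loopB tree del_node fuel stack acc
        = acc + (stack.map (fun s => cnt_node s tree del_node)).sum := by
  intro N
  induction N with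
  | zero =>
    intro stack acc fuel hN _ hstk
    cases stack with
    | nil => cases fuel <;> simp [loopB]
    | cons n rest =>
      exfalso
      have h1 : 1 ≤ ((tree.flatMap Prod.snd).length + 2) ^ pvRank tree del_node n :=
        Nat.one_le_pow _ _ (by omega)
      have : ((tree.flatMap Prod.snd).length + 2) ^ pvRank tree del_node n
          ≤ muS tree del_node (n :: rest) := by
        unfold muS; simp
      omega
  | succ N ih =>
    intro stack acc fuel hN hfuel hstk
    cases stack with
    | nil => cases fuel <;> simp [loopB]
    | cons n rest =>
      obtain ⟨hndel, hnR⟩ := hstk n (by simp)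
      have hpow1 : 1 ≤ ((tree.flatMap Prod.snd).length + 2) ^ pvRank tree del_node n :=
        Nat.one_le_pow _ _ (by omega)
      have hmu : muS tree del_node (n :: rest)
          = ((tree.flatMap Prod.snd).length + 2) ^ pvRank tree del_node n
            + muS tree del_node rest := by
        unfold muS; simp
      obtain ⟨f, rfl⟩ : ∃ f, fuel = f + 1 := ⟨fuel - 1, by omega⟩
      obtain ⟨cs, hfind, hmem⟩ := lookup_exists tree n (hR n hnR).1
      have hkle := muS_kids_le tree del_node node n cs hR hnR hndel hfind hmem
      simp only [loopB, hfind]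
      set kids := cs.filter (fun c => c != del_node) with hkids
      have hsum_eq : (cs.map (fun c => cnt_node c tree del_node)).sum
          = (kids.map (fun c => cnt_node c tree del_node)).sum :=
        sum_filter_ne del_node (fun c => cnt_node c tree del_node) (cnt_node_del tree del_node) cs
      by_cases hke : kids = []
      · rw [if_pos hke]
        have hcnt : cnt_node n tree del_node = 1 := by
          rw [cnt_node_expand tree del_node node n cs hR hnR hndel hfind]
          rw [hsum_eq, hke]
          simp
        rw [ih rest (acc + 1) f (by omega) (by omega) (fun s hs => hstk s (by simp [hs]))]
        simp [hcnt]
        ring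
      · rw [if_neg hke]
        have hkstk : ∀ s ∈ kids.reverse ++ rest,
            s ≠ del_node ∧ s ∈ ReachSet tree del_node node := by
          intro s hs
          rcases List.mem_append.mp hs with hs | hs
          · have hs' := List.mem_reverse.mp hs
            have hsc : s ∈ cs ∧ s ≠ del_node := by
              have := List.mem_filter.mp hs'
              exact ⟨this.1, by simpa using this.2⟩
            have hss : s ∈ succs tree del_node n :=
              mem_succs_of tree del_node n s cs hndel hfind hsc.1 hsc.2
            exact ⟨hsc.2, ReachSet_closed tree del_node node hnR s hss⟩
          · exact hstk s (by simp [hs])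
        have hmu' : muS tree del_node (kids.reverse ++ rest)
            = muS tree del_node kids + muS tree del_node rest := by
          unfold muS
          rw [List.map_append, List.sum_append, List.map_reverse, List.sum_reverse]
        rw [ih (kids.reverse ++ rest) acc f (by omega) (by omega) hkstk]
        have hcnt : cnt_node n tree del_node
            = (kids.map (fun c => cnt_node c tree del_node)).sum := by
          rw [cnt_node_expand tree del_node node n cs hR hnR hndel hfind, hsum_eq]
          have hpos : 1 ≤ (kids.map (fun c => cnt_node c tree del_node)).sum := by
            obtain ⟨k, ks, hkk⟩ : ∃ k ks, kids = k :: ks := by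
              cases hkk : kids with
              | nil => exact absurd hkk hke
              | cons k ks => exact ⟨k, ks, rfl⟩
            obtain ⟨hkdel, hkmem⟩ := hkstk k (by simp [hkk])
            have h1 := cnt_node_pos tree del_node node k hR hkmem hkdel
            have h2 : 0 ≤ (ks.map (fun c => cnt_node c tree del_node)).sum := by
              apply List.sum_nonneg
              intro x hx
              obtain ⟨c, _, rfl⟩ := List.mem_map.mp hx
              exact cnt_node_nonneg tree del_node c
            rw [hkk]
            simp only [List.map_cons, List.sum_cons]
            omega
          rw [if_neg (by omega)]
        simp only [List.map_append, List.map_reverse, List.sum_append, List.sum_reverse,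
          List.map_cons, List.sum_cons]
        rw [hcnt]

-- ===== VERDICT (by name: the statement is the Claim_ definition above) =====
theorem cnt_node_spec : Claim_equal_cnt_node := by
  intro node tree del_node _ hpre
  unfold Spec_cnt_node
  rcases hpre with hdel | ⟨hdel, hR⟩
  · subst hdel
    rw [cnt_node_del]
    simp [cnt_node_alt]
  · have hnR : node ∈ ReachSet tree del_node node := self_mem_ReachSet tree del_node node
    have hkeys : ∀ x ∈ ReachSet tree del_node node, x ∈ tree.map Prod.fst :=
      fun x hx => (hR x hx).1
    have hfuel : muS tree del_node [node] ≤ pvBFuel tree := by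
      unfold muS pvBFuel
      simp only [List.map_cons, List.map_nil, List.sum_cons, List.sum_nil, Nat.add_zero]
      exact Nat.pow_le_pow_right (by omega)
        (by have := pvRank_le_keys tree del_node node node hkeys hnR; omega)
    have := loopB_inv tree del_node node hR (muS tree del_node [node]) [node] 0 (pvBFuel tree)
      (le_refl _) hfuel (fun s hs => by
        simp at hs
        subst hs
        exact ⟨hdel, hnR⟩)
    unfold cnt_node_alt
    rw [if_neg hdel, this]
    simp
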